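-- pv_equiv track=rewrite | github.com/fatihelbl/python-test | silinecekcrc.py | crc
-- ===== SOURCE A (Python) =====
-- def crc (buffer,lenght):
--     crc= 0xffff
--     for i in range(lenght):
--         crc = crc ^ i
--         for j in range(8):
--             if((crc & 0x0001) == 1):
--                 crc = crc >> 1
--                 crc = crc ^ 0xA001
--             else:
--                 crc= crc >>1
--     return crc
-- ===== SOURCE B (Python) =====
-- # Table-driven CRC-16/Modbus: precompute the 256 per-byte remainders once,
-- # then one table lookup per index instead of the 8-iteration bit loop.
-- def _row(b):
--     t = b
--     for _ in range(8):
--         t = (t >> 1) ^ 0xA001 if t & 1 else t >> 1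
--     return t
--
-- _TABLE = [_row(b) for b in range(256)]
--
-- def crc(buffer, lenght):
--     c = 0xffff
--     for i in range(lenght):
--         x = c ^ i
--         c = (x >> 8) ^ _TABLE[x & 0xff]
--     return c
-- ===== Notes on version B (the rewrite author's own statement) =====
-- stated objective: faster
-- what changed: Replaces A's per-index 8-iteration shift/xor bit loop with a precomputed 256-entry byte table and a single (x>>8)^table[x&0xff] lookup per index (correct for indices beyond 255 because the untouched high bits pass through the x>>8 term by GF(2) linearity).
import Mathlib
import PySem

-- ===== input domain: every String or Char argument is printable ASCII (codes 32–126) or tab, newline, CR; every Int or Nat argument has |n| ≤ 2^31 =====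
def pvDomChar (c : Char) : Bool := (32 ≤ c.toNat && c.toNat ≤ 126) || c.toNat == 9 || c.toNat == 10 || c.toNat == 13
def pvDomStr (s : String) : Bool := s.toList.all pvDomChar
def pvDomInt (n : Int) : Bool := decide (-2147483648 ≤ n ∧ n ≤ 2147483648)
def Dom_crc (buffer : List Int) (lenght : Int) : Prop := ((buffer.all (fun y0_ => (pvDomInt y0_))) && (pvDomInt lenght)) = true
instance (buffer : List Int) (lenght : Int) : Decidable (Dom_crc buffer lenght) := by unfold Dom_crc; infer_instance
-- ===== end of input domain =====

-- B replaces A's per-index 8-iteration bit loop with a precomputed 256-entry byte table (objective: faster, constant factor).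

-- ===== PORT A =====
-- one iteration of A's inner `for j in range(8)` body
def crcBitA (c : Int) : Int :=
  if PySem.Int.band c 1 = 1 then PySem.Int.bxor (c >>> 1) 0xA001 else c >>> 1

def crc (buffer : List Int) (lenght : Int) : Int :=
  (PySem.List.pyRange 0 lenght 1).foldl
    (fun c i => (PySem.List.pyRange 0 8 1).foldl (fun c _ => crcBitA c) (PySem.Int.bxor c i))
    0xffff

-- ===== PORT B =====
-- _row of Source B: the 8-iteration bit loop applied once to a table seed
def crcRowB (b : Int) : Int :=
  (PySem.List.pyRange 0 8 1).foldl
    (fun t _ => if PySem.Int.band t 1 = 1 then PySem.Int.bxor (t >>> 1) 0xA001 else t >>> 1) b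

-- _TABLE of Source B
def crcTableB : List Int := (PySem.List.pyRange 0 256 1).map crcRowB

def crc_alt (buffer : List Int) (lenght : Int) : Int :=
  (PySem.List.pyRange 0 lenght 1).foldl
    (fun c i =>
      let x := PySem.Int.bxor c i
      PySem.Int.bxor (x >>> 8) (PySem.List.pyGetD crcTableB (PySem.Int.band x 255) 0))
    0xffff

-- ===== PRECONDITION & SPEC =====
def Spec_crc (buffer : List Int) (lenght : Int) (out : Int) : Prop := out = crc_alt buffer lenght
instance (buffer : List Int) (lenght : Int) (out : Int) : Decidable (Spec_crc buffer lenght out) := by unfold Spec_crc; infer_instance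

-- ===== CLAIM (what is proved, stated in full; the proofs are below) =====
def Claim_equal_crc : Prop := ∀ (buffer : List Int) (lenght : Int), Dom_crc buffer lenght → Spec_crc buffer lenght (crc buffer lenght)

-- ===== LEMMAS AND PROOFS =====

-- Nat model of one bit-loop iteration and of k of them
def nRound (t : Nat) : Nat := if t &&& 1 = 1 then (t >>> 1) ^^^ 0xA001 else t >>> 1

def nRoundN : Nat → Nat → Nat
  | 0, t => t
  | k + 1, t => nRoundN k (nRound t)

lemma nRound_xor (a b : Nat) : nRound (a ^^^ b) = nRound a ^^^ nRound b := by
  unfold nRound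
  rw [Nat.and_xor_distrib_right, Nat.shiftRight_xor_distrib]
  have ha : a &&& 1 = 0 ∨ a &&& 1 = 1 := by
    have := Nat.and_le_right (n := a) (m := 1); omega
  have hb : b &&& 1 = 0 ∨ b &&& 1 = 1 := by
    have := Nat.and_le_right (n := b) (m := 1); omega
  rcases ha with h | h <;> rcases hb with h' | h' <;>
    simp [h, h', Nat.xor_assoc, Nat.xor_comm, Nat.xor_left_comm]

lemma nRoundN_xor (k a b : Nat) : nRoundN k (a ^^^ b) = nRoundN k a ^^^ nRoundN k b := by
  induction k generalizing a b with
  | zero => rfl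
  | succ k ih => simp [nRoundN, nRound_xor, ih]

lemma nRound_shiftLeft (y k : Nat) : nRound (y <<< (k + 1)) = y <<< k := by
  unfold nRound
  have h1 : (y <<< (k + 1)) &&& 1 = 0 := by
    rw [Nat.and_one_is_mod, Nat.shiftLeft_eq, pow_succ, ← mul_assoc]
    exact Nat.mul_mod_left _ 2
  have h2 : (y <<< (k + 1)) >>> 1 = y <<< k := by
    rw [Nat.shiftLeft_eq, Nat.shiftLeft_eq, Nat.shiftRight_eq_div_pow, pow_succ, pow_one, ← mul_assoc]
    exact Nat.mul_div_cancel _ (by omega)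
  simp [h1, h2]

lemma nRoundN_shiftLeft (k y : Nat) : nRoundN k (y <<< k) = y := by
  induction k generalizing y with
  | zero => simpa [nRoundN] using Nat.shiftLeft_zero y
  | succ k ih => rw [nRoundN, nRound_shiftLeft]; exact ih y

lemma nat_byte_decomp (x : Nat) : x = ((x >>> 8) <<< 8) ^^^ (x &&& 255) := by
  apply Nat.eq_of_testBit_eq; intro i
  simp [Nat.testBit_xor, Nat.testBit_shiftLeft, Nat.testBit_shiftRight, Nat.testBit_and]
  by_cases h : 8 ≤ i
  · have h255 : (255 : Nat).testBit i = false := by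
      rw [show (255 : Nat) = 2 ^ 8 - 1 by norm_num, Nat.testBit_two_pow_sub_one]; simpa
    simp [h, h255, Nat.add_sub_cancel' h]
  · have h255 : (255 : Nat).testBit i = true := by
      rw [show (255 : Nat) = 2 ^ 8 - 1 by norm_num, Nat.testBit_two_pow_sub_one]
      simpa using by omega
    simp [h, h255]

-- the table identity: 8 bit-loop rounds = high byte passthrough xor table row of the low byte
lemma nRound8_key (x : Nat) : nRoundN 8 x = (x >>> 8) ^^^ nRoundN 8 (x &&& 255) := by
  conv_lhs => rw [nat_byte_decomp x]
  rw [nRoundN_xor, nRoundN_shiftLeft]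

-- cast bridges between the Int ports and the Nat model
lemma crcBitA_cast (t : Nat) : crcBitA (t : Int) = ((nRound t : Nat) : Int) := by
  unfold crcBitA nRound
  have hb : PySem.Int.band (t : Int) 1 = ((t &&& 1 : Nat) : Int) := by
    exact_mod_cast PySem.Int.band_natCast t 1
  have hs : ((t : Int) >>> 1) = ((t >>> 1 : Nat) : Int) := rfl
  rw [hb, hs]
  by_cases h : t &&& 1 = 1
  · rw [if_pos (by exact_mod_cast h), if_pos h]
    exact_mod_cast PySem.Int.bxor_natCast (t >>> 1) 40961
  · rw [if_neg (by exact_mod_cast h), if_neg h]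

lemma foldA8_cast (t : Nat) :
    (PySem.List.pyRange 0 8 1).foldl (fun c _ => crcBitA c) (t : Int) = ((nRoundN 8 t : Nat) : Int) := by
  have hr : PySem.List.pyRange 0 8 1 = [0, 1, 2, 3, 4, 5, 6, 7] := by decide
  simp only [hr, List.foldl, crcBitA_cast]
  rfl

lemma crcRowB_cast (t : Nat) : crcRowB (t : Int) = ((nRoundN 8 t : Nat) : Int) := by
  show (PySem.List.pyRange 0 8 1).foldl (fun c _ => crcBitA c) (t : Int) = ((nRoundN 8 t : Nat) : Int)
  exact foldA8_cast t

lemma band255_lt (x : Nat) : x &&& 255 < 256 := by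
  have := Nat.and_le_right (n := x) (m := 255); omega

lemma table_lookup (x : Nat) :
    PySem.List.pyGetD crcTableB ((x &&& 255 : Nat) : Int) 0 = ((nRoundN 8 (x &&& 255) : Nat) : Int) := by
  unfold crcTableB
  rw [PySem.List.pyGetD_map_pyRange_of_nonneg crcRowB 256 ((x &&& 255 : Nat) : Int) 0
    (by positivity) (by exact_mod_cast band255_lt x)]
  exact crcRowB_cast (x &&& 255)

lemma stepA_val (t : Nat) (i : Int) (hi : 0 ≤ i) :
    (PySem.List.pyRange 0 8 1).foldl (fun c _ => crcBitA c) (PySem.Int.bxor (t : Int) i)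
      = ((nRoundN 8 (t ^^^ i.toNat) : Nat) : Int) := by
  have hx : PySem.Int.bxor (t : Int) i = ((t ^^^ i.toNat : Nat) : Int) := by
    rw [PySem.Int.bxor_of_nonneg (by positivity) hi, Int.toNat_natCast]
  rw [hx, foldA8_cast]

lemma stepB_val (t : Nat) (i : Int) (hi : 0 ≤ i) :
    (let x := PySem.Int.bxor (t : Int) i
     PySem.Int.bxor (x >>> 8) (PySem.List.pyGetD crcTableB (PySem.Int.band x 255) 0))
      = ((nRoundN 8 (t ^^^ i.toNat) : Nat) : Int) := by
  have hx : PySem.Int.bxor (t : Int) i = ((t ^^^ i.toNat : Nat) : Int) := by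
    rw [PySem.Int.bxor_of_nonneg (by positivity) hi, Int.toNat_natCast]
  set X : Nat := t ^^^ i.toNat with hX
  show PySem.Int.bxor (PySem.Int.bxor (t : Int) i >>> 8)
      (PySem.List.pyGetD crcTableB (PySem.Int.band (PySem.Int.bxor (t : Int) i) 255) 0)
      = ((nRoundN 8 X : Nat) : Int)
  rw [hx]
  have hsh : ((X : Int) >>> 8) = ((X >>> 8 : Nat) : Int) := rfl
  have hband : PySem.Int.band (X : Int) 255 = ((X &&& 255 : Nat) : Int) := by
    exact_mod_cast PySem.Int.band_natCast X 255
  rw [hsh, hband, table_lookup X]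
  rw [show PySem.Int.bxor ((X >>> 8 : Nat) : Int) ((nRoundN 8 (X &&& 255) : Nat) : Int)
        = (((X >>> 8) ^^^ nRoundN 8 (X &&& 255) : Nat) : Int) from
      by exact_mod_cast PySem.Int.bxor_natCast (X >>> 8) (nRoundN 8 (X &&& 255))]
  exact_mod_cast (nRound8_key X).symm

lemma fold_eq (l : List Int) (hl : ∀ x ∈ l, 0 ≤ x) (t : Nat) :
    l.foldl (fun c i => (PySem.List.pyRange 0 8 1).foldl (fun c _ => crcBitA c) (PySem.Int.bxor c i)) (t : Int)
      = l.foldl (fun c i =>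
          let x := PySem.Int.bxor c i
          PySem.Int.bxor (x >>> 8) (PySem.List.pyGetD crcTableB (PySem.Int.band x 255) 0)) (t : Int) := by
  induction l generalizing t with
  | nil => rfl
  | cons i l ih =>
    have hi : 0 ≤ i := hl i (List.mem_cons_self ..)
    simp only [List.foldl_cons]
    rw [stepA_val t i hi, stepB_val t i hi]
    exact ih (fun x hx => hl x (List.mem_cons_of_mem _ hx)) _

-- ===== VERDICT (by name: the statement is the Claim_ definition above) =====
theorem crc_spec : Claim_equal_crc := by
  intro buffer lenght _
  unfold Spec_crc crc crc_alt
  have := fold_eq (PySem.List.pyRange 0 lenght 1)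
    (fun x hx => ((PySem.List.mem_pyRange_one).mp hx).1) 65535
  exact this
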